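-- pv_equiv track=rewrite | github.com/daleysoftware/codeeval | 1-moderate/double-trouble/main.py | compute_permutations
-- ===== SOURCE A (Python) =====
-- def to_hex_repr(s):
--     result = []
--     for c in s:
--         result.append({
--             'A': 0x1,
--             'B': 0x2,
--             '*': 0x0
--         }[c])
--     return result
--
-- def compute_permutations(test):
--     x = to_hex_repr(test[1:len(test)//2])
--     y = to_hex_repr(test[len(test)//2:])
--     result = 1
--     for a, b in zip(x, y):
--         if a ^ b == 3:
--             return 0
--         if a == 0 and b == 0:
--             result *= 2
--     return result
-- ===== SOURCE B (Python) =====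
-- def compute_permutations(test):
--     half = len(test) // 2
--     m = {'A': 0x1, 'B': 0x2, '*': 0x0}
--     x = [m[c] for c in test[1:half]]
--     y = [m[c] for c in test[half:]]
--
--     def factor(a, b):
--         if a | b == 3:
--             return 0
--         return 2 if a | b == 0 else 1
--
--     def prod(pairs):
--         if len(pairs) == 0:
--             return 1
--         if len(pairs) == 1:
--             return factor(pairs[0][0], pairs[0][1])
--         mid = len(pairs) // 2
--         return prod(pairs[:mid]) * prod(pairs[mid:])
--
--     return prod(list(zip(x, y)))
-- ===== Notes on version B (the rewrite author's own statement) =====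
-- stated objective: alternative
-- what changed: Replaced A's zip-scan loop with early return and running accumulator by a per-pair factor function (0 on conflict, 2 on double wildcard, 1 otherwise) and a divide-and-conquer product over the encoded pairs; a conflict yields 0 through multiplication instead of an early return.
import Mathlib
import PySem

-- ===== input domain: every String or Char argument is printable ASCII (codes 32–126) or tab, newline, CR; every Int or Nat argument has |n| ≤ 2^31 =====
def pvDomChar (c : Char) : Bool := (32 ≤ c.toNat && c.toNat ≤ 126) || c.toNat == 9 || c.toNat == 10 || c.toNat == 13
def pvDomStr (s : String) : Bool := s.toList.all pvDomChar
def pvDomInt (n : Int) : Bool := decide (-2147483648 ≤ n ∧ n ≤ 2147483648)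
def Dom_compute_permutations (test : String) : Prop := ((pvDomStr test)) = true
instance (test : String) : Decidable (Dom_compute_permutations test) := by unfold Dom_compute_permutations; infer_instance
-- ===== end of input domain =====

-- B replaces A's scan loop with early return by a per-pair 0/1/2 factor function and a
-- divide-and-conquer product over the zipped encoded halves; objective: alternative.

-- ===== PORT A =====
-- the dict literal {'A':1,'B':2,'*':0}[c]; none = KeyError
def pvHex (c : Char) : Option Int :=
  if c = 'A' then some 1 else if c = 'B' then some 2 else if c = '*' then some 0 else none

-- A's to_hex_repr: append loop over s; none once a KeyError occurs
def to_hex_repr (s : List Char) : Option (List Int) :=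
  s.foldl (fun acc c =>
    match acc, pvHex c with
    | some r, some v => some (r ++ [v])
    | _, _ => none) (some [])

-- A's for-loop over zip(x, y) with early return 0
def pvLoopA : List (Int × Int) → Int → Int
  | [], r => r
  | (a, b) :: t, r =>
    if PySem.Int.bxor a b == 3 then 0
    else if a == 0 && b == 0 then pvLoopA t (r * 2) else pvLoopA t r

def compute_permutations (test : String) : Int :=
  let xs := test.toList
  let h := PySem.Int.floordiv (xs.length : Int) 2
  match to_hex_repr (PySem.List.slice xs (some 1) (some h)),
        to_hex_repr (PySem.List.slice xs (some h) none) with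
  | some x, some y => pvLoopA (x.zip y) 1
  | _, _ => 0     -- KeyError in Python: excluded by Pre_

-- ===== PORT B =====
-- B's list comprehension [m[c] for c in s]; none = KeyError
def pvEncode (s : List Char) : Option (List Int) := s.mapM pvHex

-- B's factor(a, b): 0 on conflict, 2 on double wildcard, 1 otherwise
def pvFactor (a b : Int) : Int :=
  if PySem.Int.bor a b == 3 then 0 else if PySem.Int.bor a b == 0 then 2 else 1

-- B's prod(pairs): divide-and-conquer product; pairs[:mid] / pairs[mid:] with the Nat
-- mid = len(pairs)//2 are exactly take/drop (nonnegative bounds), pairs[0] is pyGet? 0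
def pvProd (pairs : List (Int × Int)) : Int :=
  if _h0 : pairs.length = 0 then 1
  else if _h1 : pairs.length = 1 then
    match PySem.List.pyGet? pairs 0 with
    | some p => pvFactor p.1 p.2
    | none => 1     -- unreachable: length is 1
  else
    pvProd (pairs.take (pairs.length / 2)) * pvProd (pairs.drop (pairs.length / 2))
  termination_by pairs.length
  decreasing_by
  · simp only [List.length_take]; omega
  · simp only [List.length_drop]; omega

def compute_permutations_alt (test : String) : Int :=
  let xs := test.toList
  let half := PySem.Int.floordiv (xs.length : Int) 2
  match pvEncode (PySem.List.slice xs (some 1) (some half)),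
        pvEncode (PySem.List.slice xs (some half) none) with
  | some x, some y => pvProd (x.zip y)
  | _, _ => 0     -- KeyError in Python: excluded by Pre_

-- ===== PRECONDITION & SPEC =====
-- Pre_ excludes exactly the inputs where Python A (and B) raises KeyError: a character of
-- test[1:len//2] or test[len//2:] outside the mapping's three keys (A, B, asterisk).
def Pre_compute_permutations (test : String) : Prop :=
  ((PySem.List.slice test.toList (some 1)
      (some (PySem.Int.floordiv (test.toList.length : Int) 2)) ++
    PySem.List.slice test.toList
      (some (PySem.Int.floordiv (test.toList.length : Int) 2)) none).all
    (fun c => c == 'A' || c == 'B' || c == '*')) = true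
instance (test : String) : Decidable (Pre_compute_permutations test) := by
  unfold Pre_compute_permutations; infer_instance

def pvWitness_compute_permutations : String := "*AB*"

def Spec_compute_permutations (test : String) (out : Int) : Prop := out = compute_permutations_alt test
instance (test : String) (out : Int) : Decidable (Spec_compute_permutations test out) := by unfold Spec_compute_permutations; infer_instance

-- ===== CLAIM (what is proved, stated in full; the proofs are below) =====
def Claim_equal_compute_permutations : Prop := ∀ (test : String), Dom_compute_permutations test → Pre_compute_permutations test → Spec_compute_permutations test (compute_permutations test)

-- ===== LEMMAS AND PROOFS =====

theorem toHex_foldl_none (s : List Char) :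
    s.foldl (fun acc c =>
      match acc, pvHex c with
      | some r, some v => some (r ++ [v])
      | _, _ => none) none = (none : Option (List Int)) := by
  induction s with
  | nil => rfl
  | cons c t ih => simp [List.foldl]; exact ih

theorem toHex_foldl_eq (s : List Char) : ∀ (r : List Int),
    s.foldl (fun acc c =>
      match acc, pvHex c with
      | some r, some v => some (r ++ [v])
      | _, _ => none) (some r) = (s.mapM pvHex).map (fun l => r ++ l) := by
  induction s with
  | nil => intro r; simp
  | cons c t ih =>
    intro r
    simp only [List.foldl, List.mapM_cons]
    cases h : pvHex c with
    | none => simp [toHex_foldl_none]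
    | some v =>
      rw [ih (r ++ [v])]
      cases hm : t.mapM pvHex <;> simp

theorem toHex_eq_encode (s : List Char) : to_hex_repr s = pvEncode s := by
  unfold to_hex_repr pvEncode
  rw [toHex_foldl_eq s []]
  cases hm : s.mapM pvHex <;> simp

-- closed form of A's loop
theorem loopA_closed (l : List (Int × Int)) : ∀ (r : Int),
    pvLoopA l r =
      if l.any (fun p => PySem.Int.bxor p.1 p.2 == 3) then 0
      else r * 2 ^ l.countP (fun p => p.1 == 0 && p.2 == 0) := by
  induction l with
  | nil => intro r; simp [pvLoopA]
  | cons p t ih =>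
    intro r
    obtain ⟨a, b⟩ := p
    by_cases h1 : PySem.Int.bxor a b = 3
    · have hb : (PySem.Int.bxor a b == 3) = true := by simpa using h1
      simp [pvLoopA, hb]
    · have hbe : (PySem.Int.bxor a b == 3) = false := by simpa using h1
      by_cases h2 : a = 0 ∧ b = 0
      · have h2b : (a == 0 && b == 0) = true := by simp [h2.1, h2.2]
        simp only [pvLoopA, hbe, Bool.false_eq_true, if_false, h2b, if_true, ih,
          List.any_cons, Bool.false_or, List.countP_cons]
        split_ifs with h3
        · rfl
        · simp only [pow_succ]; ring
      · have h2b : (a == 0 && b == 0) = false := by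
          rcases not_and_or.mp h2 with h | h <;> simp [h]
        simp only [pvLoopA, hbe, Bool.false_eq_true, if_false, h2b, ih,
          List.any_cons, Bool.false_or, List.countP_cons]
        simp

-- B's prod computes the product of the pair factors
theorem pvProd_eq (pairs : List (Int × Int)) :
    pvProd pairs = (pairs.map (fun p => pvFactor p.1 p.2)).prod := by
  generalize hn : pairs.length = n
  induction n using Nat.strong_induction_on generalizing pairs with
  | _ n ih =>
  rw [pvProd]
  subst hn
  split
  · next h0 =>
    have : pairs = [] := List.length_eq_zero_iff.mp h0
    subst this; simp
  · next h0 =>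
  split
  · next h1 =>
    obtain ⟨p, t, rfl⟩ : ∃ p t, pairs = p :: t := by
      cases pairs with
      | nil => simp at h1
      | cons p t => exact ⟨p, t, rfl⟩
    have ht : t = [] := by
      simp only [List.length_cons] at h1
      exact List.length_eq_zero_iff.mp (by omega)
    subst ht
    simp [PySem.List.pyGet?, PySem.List.pyIdx?]
  · next h1 =>
    rw [ih _ (by simp only [List.length_take]; omega) (pairs.take (pairs.length / 2)) rfl,
        ih _ (by simp only [List.length_drop]; omega) (pairs.drop (pairs.length / 2)) rfl,
        ← List.prod_append, ← List.map_append, List.take_append_drop]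

theorem pvHex_mem (c : Char) {a : Int} (h : pvHex c = some a) : a = 0 ∨ a = 1 ∨ a = 2 := by
  unfold pvHex at h
  split_ifs at h <;> simp_all

-- every element produced by the encoding is 0, 1 or 2
theorem encode_mem : ∀ (s : List Char) (x : List Int), s.mapM pvHex = some x →
    ∀ a ∈ x, a = 0 ∨ a = 1 ∨ a = 2 := by
  intro s
  induction s with
  | nil => intro x hx; simp at hx; subst hx; simp
  | cons c t ih =>
    intro x hx
    simp only [List.mapM_cons] at hx
    cases hc : pvHex c with
    | none => simp [hc] at hx
    | some a =>
      cases ht : t.mapM pvHex with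
      | none => simp [hc, ht] at hx
      | some xr =>
        simp [hc, ht] at hx
        subst hx
        intro v hv
        rcases List.mem_cons.mp hv with rfl | hv
        · exact pvHex_mem c hc
        · exact ih xr ht v hv

-- the product of the factors equals A's closed form, for pairs of encoded values
theorem prod_factors_closed : ∀ (l : List (Int × Int)),
    (∀ p ∈ l, (p.1 = 0 ∨ p.1 = 1 ∨ p.1 = 2) ∧ (p.2 = 0 ∨ p.2 = 1 ∨ p.2 = 2)) →
    (l.map (fun p => pvFactor p.1 p.2)).prod =
      if l.any (fun p => PySem.Int.bxor p.1 p.2 == 3) then 0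
      else 2 ^ l.countP (fun p => p.1 == 0 && p.2 == 0) := by
  intro l
  induction l with
  | nil => intro _; simp
  | cons p t ih =>
    intro hm
    obtain ⟨a, b⟩ := p
    obtain ⟨ha, hb⟩ := hm (a, b) List.mem_cons_self
    have hxor : (PySem.Int.bor a b == 3) = (PySem.Int.bxor a b == 3) := by
      rcases ha with rfl|rfl|rfl <;> rcases hb with rfl|rfl|rfl <;> decide
    have hzero : (PySem.Int.bor a b == 0) = (a == 0 && b == 0) := by
      rcases ha with rfl|rfl|rfl <;> rcases hb with rfl|rfl|rfl <;> decide
    have hIH := ih (fun q hq => hm q (List.mem_cons_of_mem _ hq))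
    simp only [List.map_cons, List.prod_cons, List.any_cons, List.countP_cons, hIH]
    simp only [pvFactor, hxor, hzero]
    by_cases h3 : (PySem.Int.bxor a b == 3) = true
    · simp [h3]
    · simp only [h3, Bool.false_eq_true, if_false]
      simp only [Bool.not_eq_true] at h3
      simp only [Bool.false_or]
      by_cases hz : (a == 0 && b == 0) = true
      · simp only [hz, if_true]
        by_cases hr : (t.any (fun p => PySem.Int.bxor p.1 p.2 == 3)) = true
        · simp [hr]
        · simp only [Bool.not_eq_true] at hr
          simp only [hr, Bool.false_eq_true, if_false]
          ring
      · simp only [Bool.not_eq_true] at hz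
        simp only [hz, Bool.false_eq_true, if_false]
        split_ifs <;> simp

theorem compute_permutations_total_eq (test : String) :
    compute_permutations test = compute_permutations_alt test := by
  simp only [compute_permutations, compute_permutations_alt, toHex_eq_encode]
  cases hx : pvEncode (PySem.List.slice test.toList (some 1)
      (some (PySem.Int.floordiv (test.toList.length : Int) 2))) with
  | none => rfl
  | some x =>
  cases hy : pvEncode (PySem.List.slice test.toList
      (some (PySem.Int.floordiv (test.toList.length : Int) 2)) none) with
  | none => rfl
  | some y =>
  have hmem : ∀ p ∈ x.zip y, (p.1 = 0 ∨ p.1 = 1 ∨ p.1 = 2) ∧ (p.2 = 0 ∨ p.2 = 1 ∨ p.2 = 2) := by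
    intro p hp
    obtain ⟨h1, h2⟩ := List.of_mem_zip hp
    exact ⟨encode_mem _ x hx p.1 h1, encode_mem _ y hy p.2 h2⟩
  simp only [loopA_closed, pvProd_eq, prod_factors_closed (x.zip y) hmem, one_mul]

-- ===== VERDICT (by name: the statement is the Claim_ definition above) =====
theorem compute_permutations_spec : Claim_equal_compute_permutations := by
  intro test _ _
  unfold Spec_compute_permutations
  exact compute_permutations_total_eq test
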